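-- pv_equiv track=rewrite | github.com/Bhavani-Bhaskar/pdfps1 | app/utilities/content_organizer.py | _organize_text_by_page
-- ===== SOURCE A (Python) =====
-- from typing import Dict, List, Any, Optional
--
-- def _organize_text_by_page(full_text: str, page_content: Dict) -> Dict:
--     """
--     Parse full text and assign to appropriate pages.
--     """
--     try:
--         # Split text by page markers
--         lines = full_text.split('\n')
--         current_page = 1
--         current_page_text = []
--
--         for line in lines:
--             # Check for page markers like "--- Page X ---"
--             if line.strip().startswith('--- Page') and 'Page' in line:
--                 # Save previous page content
--                 if current_page_text and current_page in page_content: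
--                     page_content[current_page]['text'] = '\n'.join(current_page_text).strip()
--
--                 # Extract new page number
--                 try:
--                     page_parts = line.split('Page')[1].split('---')[0].strip()
--                     current_page = int(page_parts)
--                     current_page_text = []
--                 except (IndexError, ValueError):
--                     current_page_text.append(line)
--             else:
--                 current_page_text.append(line)
--
--         # Save last page content
--         if current_page_text and current_page in page_content:
--             page_content[current_page]['text'] = '\n'.join(current_page_text).strip()
--
--         return page_content
--
--     except Exception as e:
--         # Fallback: assign all text to page 1
--         if 1 in page_content:
--             page_content[1]['text'] = full_text
--         return page_content
-- ===== SOURCE B (Python) =====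
-- def _organize_text_by_page(full_text: str, page_content: dict) -> dict:
--     """Marker-index version: locate all parseable page-marker lines first, then
--     assign each inter-marker slice of lines to its page by index arithmetic
--     (mutates page_content like the original; same return value)."""
--     try:
--         lines = full_text.split('\n')
--         marks = [(-1, 1)]
--         for i, line in enumerate(lines):
--             if line.strip().startswith('--- Page') and 'Page' in line:
--                 try:
--                     marks.append((i, int(line.split('Page')[1].split('---')[0].strip())))
--                 except (IndexError, ValueError):
--                     pass
--         bounds = [m[0] for m in marks] + [len(lines)]
--         for k, (_, page) in enumerate(marks):
--             seg = lines[bounds[k] + 1 : bounds[k + 1]]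
--             if seg and page in page_content:
--                 page_content[page]['text'] = '\n'.join(seg).strip()
--         return page_content
--     except Exception:
--         if 1 in page_content:
--             page_content[1]['text'] = full_text
--         return page_content
-- ===== Notes on version B (the rewrite author's own statement) =====
-- stated objective: alternative
-- what changed: B replaces A's stateful line-by-line buffering with index arithmetic: one scan records only the positions and numbers of parseable page markers, and the page texts are then produced as slices of the line list between consecutive marker positions.
import Mathlib
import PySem

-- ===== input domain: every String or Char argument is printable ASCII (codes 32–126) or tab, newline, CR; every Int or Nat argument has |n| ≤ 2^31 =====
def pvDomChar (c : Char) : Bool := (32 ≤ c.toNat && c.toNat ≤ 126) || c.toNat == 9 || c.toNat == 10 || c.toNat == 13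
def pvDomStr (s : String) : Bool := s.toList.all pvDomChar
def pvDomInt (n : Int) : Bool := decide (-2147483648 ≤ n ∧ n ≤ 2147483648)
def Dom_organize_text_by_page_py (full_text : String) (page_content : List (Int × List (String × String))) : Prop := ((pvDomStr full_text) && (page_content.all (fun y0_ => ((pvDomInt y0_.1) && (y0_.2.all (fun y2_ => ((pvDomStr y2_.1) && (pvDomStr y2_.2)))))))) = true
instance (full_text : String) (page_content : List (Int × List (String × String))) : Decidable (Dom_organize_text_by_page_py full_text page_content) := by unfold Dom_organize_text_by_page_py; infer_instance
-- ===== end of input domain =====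

-- B replaces A's stateful line-by-line buffering by marker-index arithmetic (find marker
-- positions, then slice the line list between them); return-value equivalence is proved
-- (both Pythons also mutate page_content in place in the same way).

-- Shared helpers (the very same line test / number parse / dict write both Pythons contain):
-- line.strip().startswith('--- Page') and 'Page' in line
def pvIsMarker (line : String) : Bool :=
  PySem.Str.startswith (PySem.Str.strip line) "--- Page" && PySem.Str.isIn "Page" line

-- int(line.split('Page')[1].split('---')[0].strip()); none = IndexError or ValueError
def pvParsePage? (line : String) : Option Int :=
  match (PySem.Str.split? line "Page").getD [] with
  | _ :: part :: _ =>
      PySem.Int.ofStr? (PySem.Str.strip (((PySem.Str.split? part "---").getD []).headD ""))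
  | _ => none

-- inner_dict['text'] = v  (overwrite first 'text' entry in place, else append)
def pvInsertText (v : String) : List (String × String) → List (String × String)
  | [] => [("text", v)]
  | (k, w) :: rest => if k == "text" then (k, v) :: rest else (k, w) :: pvInsertText v rest

-- page_content[p]['text'] = v  (mutate the entry of the first matching key)
def pvSave (pc : List (Int × List (String × String))) (p : Int) (v : String) :
    List (Int × List (String × String)) :=
  match pc with
  | [] => []
  | (k, inner) :: rest =>
      if k == p then (k, pvInsertText v inner) :: rest else (k, inner) :: pvSave rest p v

-- p in page_content
def pvContains (pc : List (Int × List (String × String))) (p : Int) : Bool :=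
  pc.any (fun q => q.1 == p)

-- if seg and p in page_content: page_content[p]['text'] = '\n'.join(seg).strip()
def pvSaveIf (pc : List (Int × List (String × String))) (p : Int) (buf : List String) :
    List (Int × List (String × String)) :=
  if (!buf.isEmpty) && pvContains pc p then
    pvSave pc p (PySem.Str.strip (PySem.Str.join "\n" buf))
  else pc

-- ===== PORT A =====
-- One fold over the lines carrying (current_page, current_page_text, page_content),
-- then the final save.  (A's outer 'except' is unreachable for well-typed inputs.)
def organize_text_by_page_py (full_text : String)
    (page_content : List (Int × List (String × String))) :
    List (Int × List (String × String)) :=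
  let lines := ((PySem.Str.split? full_text "\n").getD [])
  let st := lines.foldl
    (fun (st : Int × List String × List (Int × List (String × String))) line =>
      let (page, buf, pc) := st
      if pvIsMarker line then
        let pc' := pvSaveIf pc page buf
        match pvParsePage? line with
        | some n => (n, [], pc')
        | none => (page, buf ++ [line], pc')
      else (page, buf ++ [line], pc))
    (1, [], page_content)
  pvSaveIf st.2.2 st.1 st.2.1

-- ===== PORT B =====
-- First loop (for i, line in enumerate(lines)): collect marks = [(-1,1)] ++ the positions
-- and page numbers of the parseable markers.  Second loop (for k, (_, page) in
-- enumerate(marks)): write the slice lines[bounds[k]+1 : bounds[k+1]].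
def organize_text_by_page_py_alt (full_text : String)
    (page_content : List (Int × List (String × String))) :
    List (Int × List (String × String)) :=
  let lines := ((PySem.Str.split? full_text "\n").getD [])
  let marks : List (Int × Int) :=
    (PySem.List.enumerate lines 0).foldl
      (fun acc il =>
        if pvIsMarker il.2 then
          match pvParsePage? il.2 with
          | some n => acc ++ [(il.1, n)]
          | none => acc
        else acc)
      [((-1 : Int), (1 : Int))]
  let bounds : List Int := marks.map Prod.fst ++ [(lines.length : Int)]
  (PySem.List.enumerate marks 0).foldl
    (fun pc km =>
      pvSaveIf pc km.2.2
        (PySem.List.slice lines (some ((PySem.List.pyGet? bounds km.1).getD 0 + 1))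
          (some ((PySem.List.pyGet? bounds (km.1 + 1)).getD 0))))
    page_content

-- ===== PRECONDITION & SPEC =====
def Spec_organize_text_by_page_py (full_text : String) (page_content : List (Int × List (String × String))) (out : List (Int × List (String × String))) : Prop := out = organize_text_by_page_py_alt full_text page_content
instance (full_text : String) (page_content : List (Int × List (String × String))) (out : List (Int × List (String × String))) : Decidable (Spec_organize_text_by_page_py full_text page_content out) := by unfold Spec_organize_text_by_page_py; infer_instance

-- ===== CLAIM (what is proved, stated in full; the proofs are below) =====
def Claim_equal_organize_text_by_page_py : Prop := ∀ (full_text : String) (page_content : List (Int × List (String × String))), Dom_organize_text_by_page_py full_text page_content → Spec_organize_text_by_page_py full_text page_content (organize_text_by_page_py full_text page_content)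

-- ===== LEMMAS AND PROOFS =====

-- Recursive form of A's loop (fold + final save).
def pvRunA : List String → Int → List String → List (Int × List (String × String)) →
    List (Int × List (String × String))
  | [], page, buf, pc => pvSaveIf pc page buf
  | line :: rest, page, buf, pc =>
    if pvIsMarker line then
      match pvParsePage? line with
      | some n => pvRunA rest n [] (pvSaveIf pc page buf)
      | none => pvRunA rest page (buf ++ [line]) (pvSaveIf pc page buf)
    else pvRunA rest page (buf ++ [line]) pc

-- Relative position and page number of the first parseable marker line.
def pvFirstMark : List String → Option (Nat × Int)
  | [] => none
  | line :: rest =>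
    if pvIsMarker line then
      match pvParsePage? line with
      | some n => some (0, n)
      | none => (pvFirstMark rest).map (fun p => (p.1 + 1, p.2))
    else (pvFirstMark rest).map (fun p => (p.1 + 1, p.2))

-- Recursive form of B's first loop (marker collection, absolute positions from base d).
def pvMarksRec : List String → Int → List (Int × Int)
  | [], _ => []
  | line :: rest, d =>
    if pvIsMarker line then
      match pvParsePage? line with
      | some n => (d, n) :: pvMarksRec rest (d + 1)
      | none => pvMarksRec rest (d + 1)
    else pvMarksRec rest (d + 1)

-- Recursive form of B's second loop, position counter k made explicit.
def pvWriteLoop (lines : List String) (bounds : List Int) :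
    Nat → List (Int × Int) → List (Int × List (String × String)) →
    List (Int × List (String × String))
  | _, [], pc => pc
  | k, m :: rest, pc =>
    pvWriteLoop lines bounds (k + 1) rest
      (pvSaveIf pc m.2
        (PySem.List.slice lines (some ((PySem.List.pyGet? bounds (k : Int)).getD 0 + 1))
          (some ((PySem.List.pyGet? bounds ((k : Int) + 1)).getD 0))))

-- B's second loop with the bounds lookups resolved: each mark writes the slice from just
-- after its own position up to the next mark's position (or the end of the lines).
def pvWriteSegs (lines : List String) :
    List (Int × Int) → List (Int × List (String × String)) →
    List (Int × List (String × String))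
  | [], pc => pc
  | [(i, p)], pc => pvSaveIf pc p (PySem.List.slice lines (some (i + 1)) (some (lines.length : Int)))
  | (i, p) :: (j, q) :: rest, pc =>
    pvWriteSegs lines ((j, q) :: rest) (pvSaveIf pc p (PySem.List.slice lines (some (i + 1)) (some j)))

theorem pvRunA_eq_foldl (lines : List String) (page : Int) (buf : List String)
    (pc : List (Int × List (String × String))) :
    (let st := lines.foldl
        (fun (st : Int × List String × List (Int × List (String × String))) line =>
          let (page, buf, pc) := st
          if pvIsMarker line then
            let pc' := pvSaveIf pc page buf
            match pvParsePage? line with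
            | some n => (n, [], pc')
            | none => (page, buf ++ [line], pc')
          else (page, buf ++ [line], pc))
        (page, buf, pc);
      pvSaveIf st.2.2 st.1 st.2.1) = pvRunA lines page buf pc := by
  induction lines generalizing page buf pc with
  | nil => simp [pvRunA]
  | cons line rest ih =>
    simp only [List.foldl_cons, pvRunA]
    by_cases h : pvIsMarker line = true
    · simp only [h, if_true]
      cases hp : pvParsePage? line <;> simp [ih]
    · simp [h, ih]

theorem pvMarksRec_eq_foldl (lines : List String) (d : Int) (acc : List (Int × Int)) :
    ((PySem.List.enumerate lines d).foldl
      (fun acc (il : Int × String) =>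
        if pvIsMarker il.2 then
          match pvParsePage? il.2 with
          | some n => acc ++ [(il.1, n)]
          | none => acc
        else acc) acc) = acc ++ pvMarksRec lines d := by
  induction lines generalizing d acc with
  | nil => simp [PySem.List.enumerate_nil, pvMarksRec]
  | cons line rest ih =>
    rw [PySem.List.enumerate_cons]
    simp only [List.foldl_cons, pvMarksRec]
    by_cases h : pvIsMarker line = true
    · simp only [h, if_true]
      cases hp : pvParsePage? line <;> simp [ih]
    · simp [h, ih]

theorem pvWriteLoop_eq_foldl (lines : List String) (bounds : List Int)
    (ms : List (Int × Int)) (k : Nat) (pc : List (Int × List (String × String))) :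
    ((PySem.List.enumerate ms (k : Int)).foldl
      (fun pc (km : Int × Int × Int) =>
        pvSaveIf pc km.2.2
          (PySem.List.slice lines (some ((PySem.List.pyGet? bounds km.1).getD 0 + 1))
            (some ((PySem.List.pyGet? bounds (km.1 + 1)).getD 0)))) pc)
      = pvWriteLoop lines bounds k ms pc := by
  induction ms generalizing k pc with
  | nil => simp [PySem.List.enumerate_nil, pvWriteLoop]
  | cons m rest ih =>
    rw [PySem.List.enumerate_cons]
    simp only [List.foldl_cons, pvWriteLoop]
    have hk : ((k : Int) + 1) = ((k + 1 : Nat) : Int) := by push_cast; ring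
    rw [hk, ih]

theorem pvInsertText_insertText (v w : String) (inner : List (String × String)) :
    pvInsertText w (pvInsertText v inner) = pvInsertText w inner := by
  induction inner with
  | nil => simp [pvInsertText]
  | cons p rest ih =>
    obtain ⟨k, x⟩ := p
    by_cases h : k == "text"
    · simp [pvInsertText, h]
    · simp [pvInsertText, h, ih]

theorem pvSave_save (pc : List (Int × List (String × String))) (p : Int) (v w : String) :
    pvSave (pvSave pc p v) p w = pvSave pc p w := by
  induction pc with
  | nil => simp [pvSave]
  | cons q rest ih =>
    obtain ⟨k, inner⟩ := q
    by_cases h : k == p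
    · simp [pvSave, h, pvInsertText_insertText]
    · simp [pvSave, h, ih]

theorem pvContains_save (pc : List (Int × List (String × String))) (p q : Int) (v : String) :
    pvContains (pvSave pc p v) q = pvContains pc q := by
  induction pc with
  | nil => simp [pvSave]
  | cons e rest ih =>
    obtain ⟨k, inner⟩ := e
    simp only [pvContains] at ih ⊢
    by_cases h : k == p <;> simp [pvSave, h, ih]

theorem pvSaveIf_saveIf (pc : List (Int × List (String × String))) (p : Int)
    (buf buf' : List String) (h : buf' ≠ []) :
    pvSaveIf (pvSaveIf pc p buf) p buf' = pvSaveIf pc p buf' := by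
  unfold pvSaveIf
  by_cases hc : pvContains pc p = true
  · by_cases hb : buf.isEmpty
    · simp [hb]
    · simp [hb, hc, pvContains_save, pvSave_save, List.isEmpty_eq_false_iff.mpr h]
  · simp [hc]

-- A's run, characterised by the first parseable marker: everything before it is one
-- buffer write (the intermediate writes at unparseable markers are overwritten).
theorem pvRunA_firstMark (tail : List String) (page : Int) (buf : List String)
    (pc : List (Int × List (String × String))) :
    pvRunA tail page buf pc =
      match pvFirstMark tail with
      | none => pvSaveIf pc page (buf ++ tail)
      | some (i, n) =>
          pvRunA (tail.drop (i + 1)) n [] (pvSaveIf pc page (buf ++ tail.take i)) := by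
  induction tail generalizing page buf pc with
  | nil => simp [pvRunA, pvFirstMark]
  | cons line rest ih =>
    by_cases hm : pvIsMarker line = true
    · cases hp : pvParsePage? line with
      | some n => simp [pvRunA, pvFirstMark, hm, hp]
      | none =>
        simp only [pvRunA, pvFirstMark, hm, hp, if_true]
        rw [ih]
        cases hf : pvFirstMark rest with
        | none =>
          simp only [Option.map_none]
          rw [pvSaveIf_saveIf _ _ _ _ (by simp)]
          simp
        | some p =>
          obtain ⟨i, n⟩ := p
          simp only [Option.map_some]
          rw [pvSaveIf_saveIf _ _ _ _ (by simp)]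
          simp
    · simp only [pvRunA, pvFirstMark, hm, Bool.false_eq_true, if_false]
      rw [ih]
      cases hf : pvFirstMark rest with
      | none => simp [hf]
      | some p => obtain ⟨i, n⟩ := p; simp [hf]

-- B's marker collection, characterised the same way.
theorem pvMarksRec_firstMark (tail : List String) (d : Int) :
    pvMarksRec tail d =
      match pvFirstMark tail with
      | none => []
      | some (i, n) => (d + (i : Int), n) :: pvMarksRec (tail.drop (i + 1)) (d + (i : Int) + 1) := by
  induction tail generalizing d with
  | nil => simp [pvMarksRec, pvFirstMark]
  | cons line rest ih =>
    by_cases hm : pvIsMarker line = true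
    · cases hp : pvParsePage? line with
      | some n => simp [pvMarksRec, pvFirstMark, hm, hp]
      | none =>
        simp only [pvMarksRec, pvFirstMark, hm, hp, if_true]
        rw [ih]
        cases hf : pvFirstMark rest with
        | none => simp [hf]
        | some p =>
          obtain ⟨i, n⟩ := p
          simp only [Option.map_some, List.drop_succ_cons]
          have he : d + 1 + (i : Int) = d + ((i + 1 : Nat) : Int) := by push_cast; ring
          rw [he]
    · simp only [pvMarksRec, pvFirstMark, hm, Bool.false_eq_true, if_false]
      rw [ih]
      cases hf : pvFirstMark rest with
      | none => simp [hf]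
      | some p =>
        obtain ⟨i, n⟩ := p
        simp only [Option.map_some, List.drop_succ_cons]
        have he : d + 1 + (i : Int) = d + ((i + 1 : Nat) : Int) := by push_cast; ring
        rw [he]

theorem pvFirstMark_lt_length (tail : List String) (i : Nat) (n : Int)
    (h : pvFirstMark tail = some (i, n)) : i < tail.length := by
  induction tail generalizing i n with
  | nil => simp [pvFirstMark] at h
  | cons line rest ih =>
    by_cases hm : pvIsMarker line = true
    · cases hp : pvParsePage? line with
      | some m =>
        simp [pvFirstMark, hm, hp] at h
        simp [← h.1]
      | none =>
        simp only [pvFirstMark, hm, hp, if_true] at h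
        cases hf : pvFirstMark rest with
        | none => simp [hf] at h
        | some p =>
          rw [hf] at h
          simp only [Option.map_some] at h
          obtain ⟨i', n'⟩ := p
          have := ih i' n' hf
          simp at h
          simp [← h.1, List.length_cons]
          omega
    · simp only [pvFirstMark, hm, Bool.false_eq_true, if_false] at h
      cases hf : pvFirstMark rest with
      | none => simp [hf] at h
      | some p =>
        rw [hf] at h
        simp only [Option.map_some] at h
        obtain ⟨i', n'⟩ := p
        have := ih i' n' hf
        simp at h
        simp [← h.1, List.length_cons]
        omega

-- The bounds lookups of pvWriteLoop resolved: positioned at index k = pre.length into the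
-- full marks list, the current lower bound is the mark's own position and the upper bound
-- is the next mark's position (or lines.length).
theorem pvWriteLoop_eq_writeSegs (lines : List String) (marks pre ms : List (Int × Int))
    (hsplit : marks = pre ++ ms) (pc : List (Int × List (String × String))) :
    pvWriteLoop lines (marks.map Prod.fst ++ [(lines.length : Int)]) pre.length ms pc
      = pvWriteSegs lines ms pc := by
  induction ms generalizing pre pc with
  | nil => simp [pvWriteLoop, pvWriteSegs]
  | cons m rest ih =>
    obtain ⟨i, p⟩ := m
    have hlow : PySem.List.pyGet? (marks.map Prod.fst ++ [(lines.length : Int)])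
        ((pre.length : Nat) : Int) = some i := by
      rw [PySem.List.pyGet?_natCast]
      rw [hsplit, List.map_append, List.append_assoc,
        List.getElem?_append_right (by simp)]
      simp
    have hcast : ((pre.length : Nat) : Int) + 1 = ((pre.length + 1 : Nat) : Int) := by
      push_cast; ring
    cases rest with
    | nil =>
      have hnext : PySem.List.pyGet? (marks.map Prod.fst ++ [(lines.length : Int)])
          (((pre.length + 1 : Nat) : Nat) : Int) = some (lines.length : Int) := by
        rw [PySem.List.pyGet?_natCast]
        rw [hsplit, List.map_append, List.append_assoc,
          List.getElem?_append_right (by simp)]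
        simp
      simp only [pvWriteLoop, pvWriteSegs, hcast, hlow, hnext, Option.getD_some]
    | cons m' rest' =>
      obtain ⟨j, q⟩ := m'
      have hnext : PySem.List.pyGet? (marks.map Prod.fst ++ [(lines.length : Int)])
          (((pre.length + 1 : Nat) : Nat) : Int) = some j := by
        rw [PySem.List.pyGet?_natCast]
        rw [hsplit, List.map_append, List.append_assoc,
          List.getElem?_append_right (by simp)]
        simp
      rw [pvWriteLoop, pvWriteSegs, hcast, hlow, hnext]
      simp only [Option.getD_some]
      have hrec := ih (pre ++ [(i, p)]) (by rw [hsplit]; simp)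
        (pvSaveIf pc p (PySem.List.slice lines (some (i + 1)) (some j)))
      have hlen : (pre ++ [(i, p)]).length = pre.length + 1 := by simp
      rw [hlen] at hrec
      exact hrec

-- The heart of the equivalence: B's slice writes from absolute position d equal A's run on
-- the corresponding suffix of the lines.  Induction on the remaining length.
theorem pvWriteSegs_eq_runA (lines : List String) (fuel d : Nat) (page : Int)
    (pc : List (Int × List (String × String)))
    (hd : d ≤ lines.length) (hfuel : lines.length - d ≤ fuel) :
    pvWriteSegs lines (((d : Int) - 1, page) :: pvMarksRec (lines.drop d) (d : Int)) pc
      = pvRunA (lines.drop d) page [] pc := by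
  induction fuel generalizing d page pc with
  | zero =>
    have htail : lines.drop d = [] := by rw [List.drop_eq_nil_iff]; omega
    have h1 : ((d : Int) - 1 + 1) = ((d : Nat) : Int) := by ring
    rw [htail]
    simp only [pvMarksRec, pvWriteSegs, pvRunA, h1, PySem.List.slice_natCast, htail,
      List.take_nil]
  | succ fuel ih =>
    rw [pvMarksRec_firstMark, pvRunA_firstMark]
    cases hf : pvFirstMark (lines.drop d) with
    | none =>
      simp only [pvWriteSegs]
      have h1 : ((d : Int) - 1 + 1) = ((d : Nat) : Int) := by ring
      rw [h1, PySem.List.slice_natCast]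
      have htake : (lines.drop d).take (lines.length - d) = lines.drop d := by
        apply List.take_of_length_le
        simp
      rw [htake]
      simp
    | some p =>
      obtain ⟨i, n⟩ := p
      have hi : i < (lines.drop d).length := pvFirstMark_lt_length _ _ _ hf
      have hi' : d + i < lines.length := by simp at hi; omega
      simp only
      have hdrop : (lines.drop d).drop (i + 1) = lines.drop (d + i + 1) := by
        rw [List.drop_drop]; ring_nf
      have hm2 : ((d : Int) + (i : Int)) = ((d + i + 1 : Nat) : Int) - 1 := by push_cast; ring
      have hm3 : ((d : Int) + (i : Int) + 1) = ((d + i + 1 : Nat) : Int) := by push_cast; ring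
      rw [hdrop, hm3, hm2]
      simp only [pvWriteSegs]
      have hslice : PySem.List.slice lines (some ((d : Int) - 1 + 1))
          (some (((d + i + 1 : Nat) : Int) - 1)) = (lines.drop d).take i := by
        have h1 : ((d : Int) - 1 + 1) = ((d : Nat) : Int) := by ring
        have h2 : (((d + i + 1 : Nat) : Int) - 1) = ((d + i : Nat) : Int) := by push_cast; ring
        rw [h1, h2, PySem.List.slice_natCast]
        congr 1
        omega
      rw [hslice]
      rw [ih (d + i + 1) n (pvSaveIf pc page ((lines.drop d).take i)) (by omega) (by omega)]
      simp

-- ===== VERDICT (by name: the statement is the Claim_ definition above) =====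
theorem organize_text_by_page_py_spec : Claim_equal_organize_text_by_page_py := by
  intro full_text page_content _
  unfold Spec_organize_text_by_page_py
  set lines := ((PySem.Str.split? full_text "\n").getD []) with hlines
  have hA : organize_text_by_page_py full_text page_content = pvRunA lines 1 [] page_content :=
    pvRunA_eq_foldl lines 1 [] page_content
  have hmarks : ((PySem.List.enumerate lines 0).foldl
      (fun acc (il : Int × String) =>
        if pvIsMarker il.2 then
          match pvParsePage? il.2 with
          | some n => acc ++ [(il.1, n)]
          | none => acc
        else acc) [((-1 : Int), (1 : Int))])
      = ((-1 : Int), (1 : Int)) :: pvMarksRec lines 0 := by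
    simpa using pvMarksRec_eq_foldl lines 0 [((-1 : Int), (1 : Int))]
  have hB : organize_text_by_page_py_alt full_text page_content
      = pvWriteSegs lines (((-1 : Int), (1 : Int)) :: pvMarksRec lines 0) page_content := by
    unfold organize_text_by_page_py_alt
    rw [← hlines]
    simp only [hmarks]
    have hw := pvWriteLoop_eq_foldl lines
      ((((-1 : Int), (1 : Int)) :: pvMarksRec lines 0).map Prod.fst ++ [(lines.length : Int)])
      (((-1 : Int), (1 : Int)) :: pvMarksRec lines 0) 0 page_content
    simp only [Nat.cast_zero] at hw
    rw [hw]
    exact pvWriteLoop_eq_writeSegs lines _ [] _ rfl page_content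
  have hmain := pvWriteSegs_eq_runA lines lines.length 0 1 page_content (by omega) (by omega)
  simp only [Nat.cast_zero, List.drop_zero, zero_sub] at hmain
  rw [hA, hB]
  exact hmain.symm
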